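-- pv_equiv track=rewrite | github.com/4ndr0666/scr | media/prompt_builder/promptlib.py | evaluate_realism
-- ===== SOURCE A (Python) =====
-- from typing import List, Dict, Tuple, Optional
--
-- def evaluate_realism(prompt: str) -> Tuple[int, str]:
--     """
--     Score and annotate a prompt for Sora/Hailuo realism and platform fit.
--     """
--     score = 100
--     notes: List[str] = []
--     if prompt.count("[") > 1 and "," in prompt.split("[")[1]:
--         score -= 8
--         notes.append("Complex movement combo may reduce realism.")
--     if "f/1.4" in prompt and ("tracking" in prompt or "push in" in prompt):
--         score -= 6
--         notes.append("Shallow DoF with motion may blur subject detail.")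
--     if "[static shot]" in prompt and "golden-hour" in prompt:
--         score += 4
--         notes.append("Static frame with Deakins lighting is highly realistic.")
--     if "microexpression" in prompt and (
--         "handheld" in prompt or "dolly" in prompt or "tracking" in prompt
--     ):
--         score -= 5
--         notes.append("Camera motion may compromise fidelity of fine facial details.")
--     if any(lens_key in prompt for lens_key in ["35mm", "50mm"]):
--         score += 3
--         notes.append("Lens choice well-aligned with cinematic norms.")
--     score = max(50, min(score, 99))
--     explanation = (
--         "; ".join(notes) if notes else "Well-balanced cinematic configuration."
--     )
--     return score, explanation
-- ===== SOURCE B (Python) =====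
-- _DELTAS = (-8, -6, 4, -5, 3)
-- _NOTES = (
--     "Complex movement combo may reduce realism.",
--     "Shallow DoF with motion may blur subject detail.",
--     "Static frame with Deakins lighting is highly realistic.",
--     "Camera motion may compromise fidelity of fine facial details.",
--     "Lens choice well-aligned with cinematic norms.",
-- )
--
-- def _entry(mask: int):
--     score = 100 + sum(d for i, d in enumerate(_DELTAS) if mask >> i & 1)
--     notes = [n for i, n in enumerate(_NOTES) if mask >> i & 1]
--     explanation = "; ".join(notes) if notes else "Well-balanced cinematic configuration."
--     return max(50, min(score, 99)), explanation
--
-- _TABLE = [_entry(m) for m in range(32)]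
--
-- def evaluate_realism(prompt: str):
--     mask = (
--         (prompt.count("[") > 1 and "," in prompt.split("[")[1])
--         + 2 * ("f/1.4" in prompt and ("tracking" in prompt or "push in" in prompt))
--         + 4 * ("[static shot]" in prompt and "golden-hour" in prompt)
--         + 8 * ("microexpression" in prompt
--                and ("handheld" in prompt or "dolly" in prompt or "tracking" in prompt))
--         + 16 * any(k in prompt for k in ["35mm", "50mm"])
--     )
--     return _TABLE[mask]
-- ===== Notes on version B (the rewrite author's own statement) =====
-- stated objective: alternative
-- what changed: B precomputes once a 32-entry table of (score, explanation) results for every combination of the five conditions; each call only packs the five booleans into a bitmask and returns TABLE[mask], so no per-call score accumulation, note list, join or clamping happens.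
import Mathlib
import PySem

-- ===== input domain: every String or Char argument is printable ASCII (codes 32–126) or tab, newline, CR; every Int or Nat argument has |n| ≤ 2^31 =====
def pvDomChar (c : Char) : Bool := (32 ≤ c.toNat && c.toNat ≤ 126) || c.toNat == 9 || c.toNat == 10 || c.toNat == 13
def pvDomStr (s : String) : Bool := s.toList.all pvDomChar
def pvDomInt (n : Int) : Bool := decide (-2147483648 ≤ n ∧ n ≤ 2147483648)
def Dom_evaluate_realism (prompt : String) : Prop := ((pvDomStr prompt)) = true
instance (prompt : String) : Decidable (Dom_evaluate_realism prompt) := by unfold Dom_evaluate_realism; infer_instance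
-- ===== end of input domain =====

-- B precomputes a 32-entry (score, explanation) table over all condition combinations and
-- per call only builds a 5-bit mask and looks it up; objective: alternative.

-- ===== PORT A =====
-- Sequential transliteration: score/notes threaded through the five ifs in order.
-- '"," in prompt.split("[")[1]' is only reached when count("[") > 1 (Python 'and'
-- short-circuit), which guarantees index 1 exists; the `.getD` defaults are never hit there.
def evaluate_realism (prompt : String) : Int × String :=
  let score : Int := 100
  let notes : List String := []
  let (score, notes) :=
    if decide (1 < PySem.Str.count prompt "[") &&
        PySem.Str.isIn "," ((PySem.List.pyGet? ((PySem.Str.split? prompt "[").getD []) 1).getD "") then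
      (score - 8, notes ++ ["Complex movement combo may reduce realism."])
    else (score, notes)
  let (score, notes) :=
    if PySem.Str.isIn "f/1.4" prompt &&
        (PySem.Str.isIn "tracking" prompt || PySem.Str.isIn "push in" prompt) then
      (score - 6, notes ++ ["Shallow DoF with motion may blur subject detail."])
    else (score, notes)
  let (score, notes) :=
    if PySem.Str.isIn "[static shot]" prompt && PySem.Str.isIn "golden-hour" prompt then
      (score + 4, notes ++ ["Static frame with Deakins lighting is highly realistic."])
    else (score, notes)
  let (score, notes) :=
    if PySem.Str.isIn "microexpression" prompt &&
        (PySem.Str.isIn "handheld" prompt || PySem.Str.isIn "dolly" prompt ||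
         PySem.Str.isIn "tracking" prompt) then
      (score - 5, notes ++ ["Camera motion may compromise fidelity of fine facial details."])
    else (score, notes)
  let (score, notes) :=
    if (["35mm", "50mm"] : List String).any (fun k => PySem.Str.isIn k prompt) then
      (score + 3, notes ++ ["Lens choice well-aligned with cinematic norms."])
    else (score, notes)
  let score := max 50 (min score 99)
  let explanation :=
    if notes.isEmpty then "Well-balanced cinematic configuration."
    else PySem.Str.join "; " notes
  (score, explanation)

-- ===== PORT B =====
def pvDeltas : List Int := [-8, -6, 4, -5, 3]
def pvNotes : List String :=
  [ "Complex movement combo may reduce realism.",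
    "Shallow DoF with motion may blur subject detail.",
    "Static frame with Deakins lighting is highly realistic.",
    "Camera motion may compromise fidelity of fine facial details.",
    "Lens choice well-aligned with cinematic norms." ]

def pvEntry (mask : Nat) : Int × String :=
  let score : Int :=
    100 + ((pvDeltas.zipIdx.filter (fun p => (mask >>> p.2) &&& 1 == 1)).map Prod.fst).sum
  let notes := (pvNotes.zipIdx.filter (fun p => (mask >>> p.2) &&& 1 == 1)).map Prod.fst
  let explanation :=
    if notes.isEmpty then "Well-balanced cinematic configuration."
    else PySem.Str.join "; " notes
  (max 50 (min score 99), explanation)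

def pvTable : List (Int × String) := (List.range 32).map pvEntry

def evaluate_realism_alt (prompt : String) : Int × String :=
  let mask : Nat :=
    (decide (1 < PySem.Str.count prompt "[") &&
       PySem.Str.isIn "," ((PySem.List.pyGet? ((PySem.Str.split? prompt "[").getD []) 1).getD "")).toNat
    + 2 * (PySem.Str.isIn "f/1.4" prompt &&
        (PySem.Str.isIn "tracking" prompt || PySem.Str.isIn "push in" prompt)).toNat
    + 4 * (PySem.Str.isIn "[static shot]" prompt && PySem.Str.isIn "golden-hour" prompt).toNat
    + 8 * (PySem.Str.isIn "microexpression" prompt &&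
        (PySem.Str.isIn "handheld" prompt || PySem.Str.isIn "dolly" prompt ||
         PySem.Str.isIn "tracking" prompt)).toNat
    + 16 * ((["35mm", "50mm"] : List String).any (fun k => PySem.Str.isIn k prompt)).toNat
  pvTable.getD mask (50, "")

-- ===== PRECONDITION & SPEC =====
def Spec_evaluate_realism (prompt : String) (out : Int × String) : Prop := out = evaluate_realism_alt prompt
instance (prompt : String) (out : Int × String) : Decidable (Spec_evaluate_realism prompt out) := by unfold Spec_evaluate_realism; infer_instance

-- ===== CLAIM (what is proved, stated in full; the proofs are below) =====
def Claim_equal_evaluate_realism : Prop := ∀ (prompt : String), Dom_evaluate_realism prompt → Spec_evaluate_realism prompt (evaluate_realism prompt)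

-- ===== LEMMAS AND PROOFS =====

-- ===== VERDICT (by name: the statement is the Claim_ definition above) =====
theorem evaluate_realism_spec : Claim_equal_evaluate_realism := by
  intro prompt _
  unfold Spec_evaluate_realism evaluate_realism evaluate_realism_alt
  cases h1 : (decide (1 < PySem.Str.count prompt "[") &&
      PySem.Str.isIn "," ((PySem.List.pyGet? ((PySem.Str.split? prompt "[").getD []) 1).getD "")) <;>
  cases h2 : (PySem.Str.isIn "f/1.4" prompt &&
      (PySem.Str.isIn "tracking" prompt || PySem.Str.isIn "push in" prompt)) <;>
  cases h3 : (PySem.Str.isIn "[static shot]" prompt && PySem.Str.isIn "golden-hour" prompt) <;>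
  cases h4 : (PySem.Str.isIn "microexpression" prompt &&
      (PySem.Str.isIn "handheld" prompt || PySem.Str.isIn "dolly" prompt ||
       PySem.Str.isIn "tracking" prompt)) <;>
  cases h5 : ((["35mm", "50mm"] : List String).any (fun k => PySem.Str.isIn k prompt)) <;>
  rfl
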